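-- pv_equiv track=rewrite | github.com/RashmithaBRamesh/video_format_classification | app.py | split_gops
-- ===== SOURCE A (Python) =====
-- def split_gops(gop):
--     gops = []
--     current = []
--
--     for f in gop:
--         if f == "I" and current:
--             gops.append(current)
--             current = []
--         current.append(f)
--
--     if current:
--         gops.append(current)
--
--     return gops
-- ===== SOURCE B (Python) =====
-- def split_gops(gop):
--     seq = list(gop)
--     groups = []
--     i = 0
--     n = len(seq)
--     while i < n:
--         try:
--             k = seq.index("I", i + 1)
--         except ValueError:
--             k = n
--         groups.append(seq[i:k])
--         i = k
--     return groups
-- ===== Notes on version B (the rewrite author's own statement) =====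
-- stated objective: alternative
-- what changed: Replaces A's single accumulator-and-flush pass with a scan that finds the next I-frame boundary via list.index and slices the group out directly, so no 'current' list is maintained.
import Mathlib
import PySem

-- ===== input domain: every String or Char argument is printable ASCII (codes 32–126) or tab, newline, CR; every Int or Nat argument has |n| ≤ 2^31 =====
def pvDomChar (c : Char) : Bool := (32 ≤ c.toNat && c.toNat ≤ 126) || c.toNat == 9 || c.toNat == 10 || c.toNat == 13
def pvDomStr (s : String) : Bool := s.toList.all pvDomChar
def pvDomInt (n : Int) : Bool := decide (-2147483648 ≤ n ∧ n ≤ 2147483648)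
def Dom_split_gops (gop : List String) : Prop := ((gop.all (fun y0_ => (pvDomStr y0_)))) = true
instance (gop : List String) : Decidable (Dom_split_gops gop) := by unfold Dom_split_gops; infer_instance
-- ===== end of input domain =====

-- B scans for the next "I"-frame boundary and slices each group out directly, instead of A's accumulator-and-flush pass (objective: alternative decomposition).

-- ===== PORT A =====
-- loop body of A's for-loop: flush `current` into `gops` on an "I" (if current nonempty), then append f to current
def stepA (st : List (List String) × List String) (f : String) : List (List String) × List String :=
  let st' := if f = "I" ∧ st.2 ≠ [] then (st.1 ++ [st.2], ([] : List String)) else st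
  (st'.1, st'.2 ++ [f])

def split_gops (gop : List String) : List (List String) :=
  let st := gop.foldl stepA (([], []) : List (List String) × List String)
  if st.2 ≠ [] then st.1 ++ [st.2] else st.1

-- ===== PORT B =====
-- B's while-loop over the suffix starting at index i, written as recursion on that suffix:
-- k = seq.index("I", i+1) (n on ValueError) makes seq[i:k] the head plus the takeWhile (· ≠ "I")
-- prefix of the tail, and i = k moves to the remaining suffix (the drop).
def splitGopsAux : List String → List (List String)
  | [] => []
  | f :: t =>
    let pre := t.takeWhile (fun x => x ≠ "I")
    (f :: pre) :: splitGopsAux (t.drop pre.length)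
termination_by l => l.length
decreasing_by
  simp only [List.length_cons, List.length_drop]
  omega

def split_gops_alt (gop : List String) : List (List String) := splitGopsAux gop

-- ===== PRECONDITION & SPEC =====
def Spec_split_gops (gop : List String) (out : List (List String)) : Prop := out = split_gops_alt gop
instance (gop : List String) (out : List (List String)) : Decidable (Spec_split_gops gop out) := by unfold Spec_split_gops; infer_instance

-- ===== CLAIM (what is proved, stated in full; the proofs are below) =====
def Claim_equal_split_gops : Prop := ∀ (gop : List String), Dom_split_gops gop → Spec_split_gops gop (split_gops gop)

-- ===== LEMMAS AND PROOFS =====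

-- A's final flush, named so the fold lemma can be stated without `let`
def finA (st : List (List String) × List String) : List (List String) :=
  if st.2 ≠ [] then st.1 ++ [st.2] else st.1

-- pure recursive reading of A's loop once `current` is nonempty
def goA (cur : List String) : List String → List (List String)
  | [] => [cur]
  | f :: t => if f = "I" then cur :: goA [f] t else goA (cur ++ [f]) t

lemma split_gops_eq_finA (gop : List String) :
    split_gops gop = finA (gop.foldl stepA ([], [])) := rfl

lemma foldl_stepA_goA (l : List String) : ∀ (gops : List (List String)) (cur : List String),
    cur ≠ [] → finA (l.foldl stepA (gops, cur)) = gops ++ goA cur l := by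
  induction l with
  | nil => intro gops cur h; simp [finA, goA, h]
  | cons f t ih =>
      intro gops cur h
      rw [List.foldl_cons]
      by_cases hf : f = "I"
      · have hs : stepA (gops, cur) f = (gops ++ [cur], [f]) := by simp [stepA, hf, h]
        rw [hs, ih (gops ++ [cur]) [f] (by simp), goA]
        simp [hf]
      · have hs : stepA (gops, cur) f = (gops, cur ++ [f]) := by simp [stepA, hf]
        rw [hs, ih gops (cur ++ [f]) (by simp), goA]
        simp [hf]

lemma drop_takeWhile_length {α : Type} (p : α → Bool) :
    ∀ (t : List α), t.drop (t.takeWhile p).length = t.dropWhile p := by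
  intro t
  induction t with
  | nil => simp
  | cons a t ih =>
      by_cases h : p a
      · simp [h, ih]
      · simp [h]

lemma splitGopsAux_nil : splitGopsAux [] = [] := by unfold splitGopsAux; rfl

lemma splitGopsAux_cons (f : String) (t : List String) :
    splitGopsAux (f :: t)
      = (f :: t.takeWhile (fun x => x ≠ "I")) :: splitGopsAux (t.dropWhile (fun x => x ≠ "I")) := by
  rw [splitGopsAux.eq_def]
  simp [drop_takeWhile_length]

lemma goA_eq_aux : ∀ (l cur : List String),
    goA cur l = (cur ++ l.takeWhile (fun x => x ≠ "I")) :: splitGopsAux (l.dropWhile (fun x => x ≠ "I")) := by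
  intro l
  induction l with
  | nil => intro cur; simp [goA, splitGopsAux_nil]
  | cons f t ih =>
      intro cur
      by_cases hf : f = "I"
      · simp [goA, hf, splitGopsAux_cons, ih]
      · simp [goA, hf, ih]

-- ===== VERDICT (by name: the statement is the Claim_ definition above) =====
theorem split_gops_spec : Claim_equal_split_gops := by
  intro gop _
  unfold Spec_split_gops split_gops_alt
  cases gop with
  | nil => simp [split_gops, splitGopsAux_nil]
  | cons f t =>
      rw [split_gops_eq_finA, List.foldl_cons]
      have h0 : stepA ([], []) f = ([], [f]) := by simp [stepA]
      rw [h0, foldl_stepA_goA t [] [f] (by simp), goA_eq_aux t [f], splitGopsAux_cons]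
      simp
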